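-- pv_equiv track=rewrite | github.com/waynegault/ancestry | run_all_tests.py | _parse_docstring_lines
-- ===== SOURCE A (Python) =====
-- def _should_skip_line(stripped: str) -> bool:
--     """Check if a line should be skipped when parsing docstrings."""
--     return stripped.startswith('#') or not stripped
--
-- def _extract_docstring_start(stripped: str, docstring_lines: list[str]) -> bool:
--     """Extract content after opening docstring quotes. Returns True if docstring started."""
--     if '"""' not in stripped:
--         return False
--
--     # Extract content after opening quotes
--     after_quotes = stripped.split('"""', 1)[1].strip()
--     if after_quotes:
--         docstring_lines.append(after_quotes)
--     return True
--
-- def _extract_docstring_end(stripped: str, docstring_lines: list[str]) -> bool: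
--     """Extract content before closing docstring quotes. Returns True if docstring ended."""
--     if '"""' not in stripped:
--         return False
--
--     # End of docstring - extract content before closing quotes
--     before_quotes = stripped.split('"""', maxsplit=1)[0].strip()
--     if before_quotes:
--         docstring_lines.append(before_quotes)
--     return True
--
-- def _parse_docstring_lines(lines: list[str]) -> list[str]:
--     """Parse file lines to extract docstring content."""
--     in_docstring = False
--     docstring_lines: list[str] = []
--
--     for line in lines:
--         stripped = line.strip()
--
--         # Skip shebang and comments at the top
--         if _should_skip_line(stripped):
--             continue
--
--         # Look for start of docstring
--         if not in_docstring:
--             if _extract_docstring_start(stripped, docstring_lines):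
--                 in_docstring = True
--             continue
--
--         # If we're in docstring, collect lines until closing quotes
--         if _extract_docstring_end(stripped, docstring_lines):
--             break
--
--         # Regular docstring line
--         if stripped:
--             docstring_lines.append(stripped)
--
--     return docstring_lines
-- ===== SOURCE B (Python) =====
-- def _parse_docstring_lines(lines: list[str]) -> list[str]:
--     """Parse file lines to extract docstring content (two-phase version)."""
--     # Phase 1: find the index of the line that opens the docstring.
--     start = None
--     for i, line in enumerate(lines):
--         s = line.strip()
--         if s.startswith('#') or not s:
--             continue
--         if '"""' in s:
--             start = i
--             break
--     if start is None:
--         return []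
--
--     out: list[str] = []
--     head = lines[start].strip().split('"""', 1)[1].strip()
--     if head:
--         out.append(head)
--
--     # Phase 2: collect body lines until the closing quotes.
--     for line in lines[start + 1:]:
--         s = line.strip()
--         if s.startswith('#') or not s:
--             continue
--         if '"""' in s:
--             tail = s.split('"""', 1)[0].strip()
--             if tail:
--                 out.append(tail)
--             break
--         out.append(s)
--     return out
-- ===== Notes on version B (the rewrite author's own statement) =====
-- stated objective: alternative
-- what changed: Replaces the single state-machine loop with a boolean in_docstring flag by two sequential phases: phase 1 scans for the index of the opening-quote line, phase 2 collects body lines from the line after that index until the closing quotes.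
import Mathlib
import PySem

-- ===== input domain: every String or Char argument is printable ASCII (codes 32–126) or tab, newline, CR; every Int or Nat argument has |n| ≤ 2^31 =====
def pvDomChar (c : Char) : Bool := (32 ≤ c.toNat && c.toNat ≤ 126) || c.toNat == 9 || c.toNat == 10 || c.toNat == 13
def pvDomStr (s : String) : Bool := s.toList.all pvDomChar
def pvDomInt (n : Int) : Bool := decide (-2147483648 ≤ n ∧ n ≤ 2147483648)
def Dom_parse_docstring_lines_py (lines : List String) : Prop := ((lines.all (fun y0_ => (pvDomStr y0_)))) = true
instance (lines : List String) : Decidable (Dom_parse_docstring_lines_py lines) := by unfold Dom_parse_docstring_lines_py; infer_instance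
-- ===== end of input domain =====

-- B replaces A's single state-machine loop with a boolean flag by two sequential phases
-- (find the opening-quote line, then collect until the closing quotes): a different decomposition, same cost.


-- ===== PORT A =====
-- `_should_skip_line(stripped)`
def pvShouldSkip (stripped : String) : Bool :=
  PySem.Str.startswith stripped "#" || stripped == ""

-- `_extract_docstring_start`: returns `some acc'` when the docstring started (True), `none` otherwise.
-- `stripped.split('"""', 1)[1]` is ported with `.getD`; the index 1 exists whenever '"""' is in stripped.
def pvExtractStart (stripped : String) (acc : List String) : Option (List String) :=
  if PySem.Str.isIn "\"\"\"" stripped then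
    let after := PySem.Str.strip (((PySem.Str.splitMax? stripped "\"\"\"" 1).getD []).getD 1 "")
    some (if after == "" then acc else acc ++ [after])
  else none

-- `_extract_docstring_end`: returns `some acc'` when the docstring ended (True), `none` otherwise.
def pvExtractEnd (stripped : String) (acc : List String) : Option (List String) :=
  if PySem.Str.isIn "\"\"\"" stripped then
    let before := PySem.Str.strip (((PySem.Str.splitMax? stripped "\"\"\"" 1).getD []).getD 0 "")
    some (if before == "" then acc else acc ++ [before])
  else none

-- the `for line in lines` loop, state = (in_docstring, docstring_lines)
def pvALoop : List String → Bool → List String → List String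
  | [], _, acc => acc
  | line :: rest, inDoc, acc =>
    let stripped := PySem.Str.strip line
    if pvShouldSkip stripped then pvALoop rest inDoc acc
    else if !inDoc then
      match pvExtractStart stripped acc with
      | some acc' => pvALoop rest true acc'
      | none => pvALoop rest false acc
    else
      match pvExtractEnd stripped acc with
      | some acc' => acc'          -- break
      | none => if stripped == "" then pvALoop rest true acc
                else pvALoop rest true (acc ++ [stripped])

def parse_docstring_lines_py (lines : List String) : List String :=
  pvALoop lines false []

-- ===== PORT B =====
-- Phase 1: index of the first non-skipped line containing '"""' (enumerate + break).
def pvBFindStart : List String → Nat → Option Nat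
  | [], _ => none
  | line :: rest, i =>
    let s := PySem.Str.strip line
    if PySem.Str.startswith s "#" || s == "" then pvBFindStart rest (i + 1)
    else if PySem.Str.isIn "\"\"\"" s then some i
    else pvBFindStart rest (i + 1)

-- Phase 2: the `for line in lines[start+1:]` loop accumulating `out`.
def pvBTail : List String → List String → List String
  | [], out => out
  | line :: rest, out =>
    let s := PySem.Str.strip line
    if PySem.Str.startswith s "#" || s == "" then pvBTail rest out
    else if PySem.Str.isIn "\"\"\"" s then
      let tail := PySem.Str.strip (((PySem.Str.splitMax? s "\"\"\"" 1).getD []).getD 0 "")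
      if tail == "" then out else out ++ [tail]
    else pvBTail rest (out ++ [s])

def parse_docstring_lines_py_alt (lines : List String) : List String :=
  match pvBFindStart lines 0 with
  | none => []
  | some start =>
    -- `lines[start]` is in range by construction; ported with `.getD`.
    let opener := (PySem.List.pyGet? lines (start : Int)).getD ""
    let head := PySem.Str.strip
      (((PySem.Str.splitMax? (PySem.Str.strip opener) "\"\"\"" 1).getD []).getD 1 "")
    let out := if head == "" then [] else [head]
    pvBTail (PySem.List.slice lines (some ((start + 1 : Nat) : Int)) none) out

-- ===== PRECONDITION & SPEC =====
def Spec_parse_docstring_lines_py (lines : List String) (out : List String) : Prop := out = parse_docstring_lines_py_alt lines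
instance (lines : List String) (out : List String) : Decidable (Spec_parse_docstring_lines_py lines out) := by unfold Spec_parse_docstring_lines_py; infer_instance

-- ===== CLAIM (what is proved, stated in full; the proofs are below) =====
def Claim_equal_parse_docstring_lines_py : Prop := ∀ (lines : List String), Dom_parse_docstring_lines_py lines → Spec_parse_docstring_lines_py lines (parse_docstring_lines_py lines)

-- ===== LEMMAS AND PROOFS =====

-- A's in-docstring loop is exactly B's phase-2 loop.
theorem pvALoop_true_eq_tail (xs : List String) : ∀ acc, pvALoop xs true acc = pvBTail xs acc := by
  induction xs with
  | nil => intro acc; rfl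
  | cons l rest ih =>
    intro acc
    simp only [pvALoop, pvBTail, pvExtractEnd, pvShouldSkip, Bool.not_true, Bool.false_eq_true, if_false]
    by_cases hsk : (PySem.Str.startswith (PySem.Str.strip l) "#" || PySem.Str.strip l == "") = true
    · simp only [hsk, if_true, ih]
    · have hsk' : (PySem.Str.startswith (PySem.Str.strip l) "#" || PySem.Str.strip l == "") = false := by
        revert hsk; cases (PySem.Str.startswith (PySem.Str.strip l) "#" || PySem.Str.strip l == "") <;> simp
      have hne : (PySem.Str.strip l == "") = false := by
        cases h : (PySem.Str.strip l == "") with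
        | false => rfl
        | true => exact absurd (by simp [h]) hsk
      simp only [hsk', Bool.false_eq_true, if_false]
      by_cases hin : PySem.Str.isIn "\"\"\"" (PySem.Str.strip l) = true
      · simp only [hin, if_true]
      · have hin' : PySem.Str.isIn "\"\"\"" (PySem.Str.strip l) = false := by
          revert hin; cases PySem.Str.isIn "\"\"\"" (PySem.Str.strip l) <;> simp
        simp only [hin', Bool.false_eq_true, if_false, hne, ih]

-- shifting the enumeration index
theorem pvBFindStart_shift (xs : List String) : ∀ i, pvBFindStart xs i = (pvBFindStart xs 0).map (· + i) := by
  induction xs with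
  | nil => intro i; rfl
  | cons l rest ih =>
    intro i
    simp only [pvBFindStart]
    split_ifs with h1 h2
    · rw [ih (i + 1), ih 1, Option.map_map]
      congr 1; funext j; simp; omega
    · simp
    · rw [ih (i + 1), ih 1, Option.map_map]
      congr 1; funext j; simp; omega

-- phase-2 loop commutes with a prefix of the accumulator
theorem pvBTail_acc (xs : List String) : ∀ a b, pvBTail xs (a ++ b) = a ++ pvBTail xs b := by
  induction xs with
  | nil => intro a b; rfl
  | cons l rest ih =>
    intro a b
    simp only [pvBTail]
    split_ifs with h1 h2 h3
    · exact ih a b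
    · simp
    · simp [List.append_assoc]
    · rw [List.append_assoc]; exact ih a (b ++ [PySem.Str.strip l])

-- unfolding B on a line the first phase skips over
theorem pv_alt_cons_skip (l : String) (rest : List String)
    (h : (PySem.Str.startswith (PySem.Str.strip l) "#" || PySem.Str.strip l == "") = true ∨ PySem.Str.isIn "\"\"\"" (PySem.Str.strip l) = false) :
    parse_docstring_lines_py_alt (l :: rest) = parse_docstring_lines_py_alt rest := by
  have hfind : pvBFindStart (l :: rest) 0 = (pvBFindStart rest 0).map (· + 1) := by
    rw [show (0:Nat) = 0 from rfl]
    simp only [pvBFindStart]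
    rcases h with h | h
    · simp only [h, if_true]; exact pvBFindStart_shift rest 1
    · by_cases hsk : (PySem.Str.startswith (PySem.Str.strip l) "#" || PySem.Str.strip l == "") = true
      · simp only [hsk, if_true]; exact pvBFindStart_shift rest 1
      · have hsk' : (PySem.Str.startswith (PySem.Str.strip l) "#" || PySem.Str.strip l == "") = false := by
          revert hsk; cases (PySem.Str.startswith (PySem.Str.strip l) "#" || PySem.Str.strip l == "") <;> simp
        simp only [hsk', h, Bool.false_eq_true, if_false]
        exact pvBFindStart_shift rest 1
  simp only [parse_docstring_lines_py_alt, hfind]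
  cases hf : pvBFindStart rest 0 with
  | none => simp
  | some j =>
    simp only [Option.map_some]
    have h1 : PySem.List.pyGet? (l :: rest) ((j + 1 : Nat) : Int) = PySem.List.pyGet? rest ((j : Nat) : Int) := by
      simp [PySem.List.pyGet?_natCast]
    have h2 : PySem.List.slice (l :: rest) (some ((j + 1 + 1 : Nat) : Int)) none
            = PySem.List.slice rest (some ((j + 1 : Nat) : Int)) none := by
      rw [PySem.List.slice_from_natCast, PySem.List.slice_from_natCast]
      rfl
    rw [h1, h2]

-- unfolding B on the opening-quote line
theorem pv_alt_cons_open (l : String) (rest : List String)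
    (hsk : (PySem.Str.startswith (PySem.Str.strip l) "#" || PySem.Str.strip l == "") = false)
    (hin : PySem.Str.isIn "\"\"\"" (PySem.Str.strip l) = true) :
    parse_docstring_lines_py_alt (l :: rest)
      = pvBTail rest
          (if PySem.Str.strip (((PySem.Str.splitMax? (PySem.Str.strip l) "\"\"\"" 1).getD []).getD 1 "") == "" then []
           else [PySem.Str.strip (((PySem.Str.splitMax? (PySem.Str.strip l) "\"\"\"" 1).getD []).getD 1 "")]) := by
  have hfind : pvBFindStart (l :: rest) 0 = some 0 := by
    simp only [pvBFindStart, hsk, hin, Bool.false_eq_true, if_false, if_true]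
  simp only [parse_docstring_lines_py_alt, hfind]
  have h1 : PySem.List.pyGet? (l :: rest) ((0 : Nat) : Int) = some l := by
    simp [PySem.List.pyGet?_natCast]
  have h2 : PySem.List.slice (l :: rest) (some ((0 + 1 : Nat) : Int)) none = rest := by
    rw [PySem.List.slice_from_natCast]; rfl
  rw [h1, h2]
  simp only [Option.getD_some]

-- main invariant: A's not-yet-in-docstring loop equals B with the accumulator prepended
theorem pvALoop_false_eq_alt (xs : List String) : ∀ acc, pvALoop xs false acc = acc ++ parse_docstring_lines_py_alt xs := by
  induction xs with
  | nil => intro acc; simp [pvALoop, parse_docstring_lines_py_alt, pvBFindStart]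
  | cons l rest ih =>
    intro acc
    simp only [pvALoop, pvShouldSkip, Bool.not_false, if_true, pvExtractStart]
    by_cases hsk : (PySem.Str.startswith (PySem.Str.strip l) "#" || PySem.Str.strip l == "") = true
    · simp only [hsk, if_true, ih, pv_alt_cons_skip l rest (Or.inl hsk)]
    · have hsk' : (PySem.Str.startswith (PySem.Str.strip l) "#" || PySem.Str.strip l == "") = false := by
        revert hsk; cases (PySem.Str.startswith (PySem.Str.strip l) "#" || PySem.Str.strip l == "") <;> simp
      simp only [hsk', Bool.false_eq_true, if_false]
      by_cases hin : PySem.Str.isIn "\"\"\"" (PySem.Str.strip l) = true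
      · simp only [hin, if_true]
        rw [pvALoop_true_eq_tail, pv_alt_cons_open l rest hsk' hin]
        by_cases hafter : (PySem.Str.strip (((PySem.Str.splitMax? (PySem.Str.strip l) "\"\"\"" 1).getD []).getD 1 "") == "") = true
        · simp only [hafter, if_true]
          have := pvBTail_acc rest acc []
          simpa using this
        · have hafter' : (PySem.Str.strip (((PySem.Str.splitMax? (PySem.Str.strip l) "\"\"\"" 1).getD []).getD 1 "") == "") = false := by
            revert hafter
            cases (PySem.Str.strip (((PySem.Str.splitMax? (PySem.Str.strip l) "\"\"\"" 1).getD []).getD 1 "") == "") <;> simp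
          simp only [hafter', Bool.false_eq_true, if_false]
          exact pvBTail_acc rest acc [_]
      · have hin' : PySem.Str.isIn "\"\"\"" (PySem.Str.strip l) = false := by
          revert hin; cases PySem.Str.isIn "\"\"\"" (PySem.Str.strip l) <;> simp
        simp only [hin', Bool.false_eq_true, if_false, ih, pv_alt_cons_skip l rest (Or.inr hin')]

-- ===== VERDICT (by name: the statement is the Claim_ definition above) =====
theorem parse_docstring_lines_py_spec : Claim_equal_parse_docstring_lines_py := by
  intro lines _
  unfold Spec_parse_docstring_lines_py parse_docstring_lines_py
  simpa using pvALoop_false_eq_alt lines []
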